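-- pv_equiv track=rewrite | github.com/pypi-data/pypi-mirror-22 | packages/BAD/BAD-1.1.3.tar.gz/BAD-1.1.3/BAD/SurfaceStatsCollector.py | _CalcPerFps
-- ===== SOURCE A (Python) =====
-- def _CalcPerFps(unit, timestamps):
--     per_fps = []
--     start_time = timestamps[0]
--     tmp_index = 0
--     for index, time_one in enumerate(timestamps):
--         if time_one - start_time >= unit:
--             per_fps.append(index - tmp_index)
--             start_time = time_one
--             tmp_index = index
--     return per_fps
-- ===== SOURCE B (Python) =====
-- def _CalcPerFps(unit, timestamps):
--     # Window-by-window recursion: search for the next boundary, emit its distance,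
--     # recurse on the suffix after it.
--     def first_hit(rest, start):
--         # offset of first element t in rest with t - start >= unit, else None
--         for k, t in enumerate(rest):
--             if t - start >= unit:
--                 return k
--         return None
--
--     def go(rest, start, bump):
--         k = first_hit(rest, start)
--         if k is None:
--             return []
--         return [k + bump] + go(rest[k + 1:], rest[k], 1)
--
--     return go(timestamps, timestamps[0], 0)
-- ===== Notes on version B (the rewrite author's own statement) =====
-- stated objective: alternative
-- what changed: B replaces A's single indexed fold carrying (start, previous-boundary-index) state by window-by-window recursion: an inner search finds the offset of the next boundary, its distance is emitted, and the function recurses on the suffix after the boundary.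
-- outside the precondition, e.g. on _CalcPerFps(1, []): A raises IndexError, B raises IndexError
import Mathlib
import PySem

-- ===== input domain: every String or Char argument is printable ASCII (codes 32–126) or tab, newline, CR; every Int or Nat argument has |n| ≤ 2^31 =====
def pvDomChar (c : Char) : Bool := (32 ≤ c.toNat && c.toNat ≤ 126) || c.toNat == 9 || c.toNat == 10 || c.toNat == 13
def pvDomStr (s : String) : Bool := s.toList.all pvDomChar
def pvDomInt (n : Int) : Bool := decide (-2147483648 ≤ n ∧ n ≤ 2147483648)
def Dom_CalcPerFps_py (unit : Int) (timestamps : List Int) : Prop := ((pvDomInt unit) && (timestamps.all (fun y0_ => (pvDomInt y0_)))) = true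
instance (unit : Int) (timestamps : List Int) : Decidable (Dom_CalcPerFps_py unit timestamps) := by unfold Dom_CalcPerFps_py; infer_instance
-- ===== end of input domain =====

-- B replaces A's single indexed fold by window-by-window recursion: an inner search
-- finds the offset of the next boundary, its distance is emitted, and the function
-- recurses on the suffix after the boundary; same O(n) cost, different decomposition.

-- ===== PORT A =====
def CalcPerFps_py (unit : Int) (timestamps : List Int) : List Int :=
  match timestamps with
  | [] => []   -- timestamps[0] raises IndexError in Python; excluded by Pre_
  | t0 :: _ =>
    ((PySem.List.enumerate timestamps).foldl
      (fun (s : List Int × Int × Int) p =>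
        if p.2 - s.2.1 ≥ unit then (s.1 ++ [p.1 - s.2.2], p.2, p.1) else s)
      ([], t0, 0)).1

-- ===== PORT B =====
/-- Python `first_hit(rest, start)`, returning together with the offset `k` the
element `rest[k]` and the suffix `rest[k+1:]` (which the caller reads off `rest`). -/
def pvFirstHit (unit start : Int) : List Int → Option (Nat × Int × List Int)
  | [] => none
  | t :: r =>
    if t - start ≥ unit then some (0, t, r)
    else (pvFirstHit unit start r).map (fun q => (q.1 + 1, q.2))

theorem pvFirstHit_length {unit start : Int} : ∀ {l : List Int} {k : Nat} {t : Int}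
    {r : List Int}, pvFirstHit unit start l = some (k, t, r) → r.length < l.length := by
  intro l
  induction l with
  | nil => intro k t r h; simp [pvFirstHit] at h
  | cons a tl ih =>
    intro k t r h
    simp only [pvFirstHit] at h
    split at h
    · cases h; simp
    · cases hq : pvFirstHit unit start tl with
      | none => rw [hq] at h; simp at h
      | some q =>
        obtain ⟨k', t', r'⟩ := q
        rw [hq] at h; simp at h
        obtain ⟨-, -, h3⟩ := h
        have := ih (k := k') (t := t') (r := r') hq
        subst h3; simp; omega

/-- Python `go(rest, start, bump)`. -/
def pvGo (unit : Int) (rest : List Int) (start bump : Int) : List Int :=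
  match h : pvFirstHit unit start rest with
  | none => []
  | some (k, t, r) => ((k : Int) + bump) :: pvGo unit r t 1
termination_by rest.length
decreasing_by exact pvFirstHit_length h

def CalcPerFps_py_alt (unit : Int) (timestamps : List Int) : List Int :=
  match timestamps with
  | [] => []   -- timestamps[0] raises IndexError in Python; excluded by Pre_
  | t0 :: _ => pvGo unit timestamps t0 0

-- ===== PRECONDITION & SPEC =====
-- A evaluates timestamps[0], which raises IndexError on the empty list.
def Pre_CalcPerFps_py (unit : Int) (timestamps : List Int) : Prop := timestamps ≠ []
instance (unit : Int) (timestamps : List Int) : Decidable (Pre_CalcPerFps_py unit timestamps) := by unfold Pre_CalcPerFps_py; infer_instance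
def pvWitness_CalcPerFps_py : Int × List Int := (1, [0])

def Spec_CalcPerFps_py (unit : Int) (timestamps : List Int) (out : List Int) : Prop := out = CalcPerFps_py_alt unit timestamps
instance (unit : Int) (timestamps : List Int) (out : List Int) : Decidable (Spec_CalcPerFps_py unit timestamps out) := by unfold Spec_CalcPerFps_py; infer_instance

-- ===== CLAIM (what is proved, stated in full; the proofs are below) =====
def Claim_equal_CalcPerFps_py : Prop := ∀ (unit : Int) (timestamps : List Int), Dom_CalcPerFps_py unit timestamps → Pre_CalcPerFps_py unit timestamps → Spec_CalcPerFps_py unit timestamps (CalcPerFps_py unit timestamps)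

-- ===== LEMMAS AND PROOFS =====

theorem pvGo_none {unit s b : Int} {rest : List Int}
    (h : pvFirstHit unit s rest = none) : pvGo unit rest s b = [] := by
  rw [pvGo]; split <;> simp_all

theorem pvGo_some {unit s b t : Int} {k : Nat} {rest r : List Int}
    (h : pvFirstHit unit s rest = some (k, t, r)) :
    pvGo unit rest s b = ((k : Int) + b) :: pvGo unit r t 1 := by
  rw [pvGo]
  split
  · simp_all
  · rename_i k' t' r' h'
    rw [h] at h'
    injection h' with h'
    injection h' with h1 h2
    injection h2 with h2 h3
    subst h1; subst h2; subst h3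
    rfl

theorem pvGo_shift (unit : Int) (t s b : Int) (r : List Int) (h : ¬ t - s ≥ unit) :
    pvGo unit (t :: r) s b = pvGo unit r s (b + 1) := by
  cases hq : pvFirstHit unit s r with
  | none =>
    have h1 : pvFirstHit unit s (t :: r) = none := by simp [pvFirstHit, h, hq]
    rw [pvGo_none h1, pvGo_none hq]
  | some q =>
    obtain ⟨k, t', r'⟩ := q
    have h1 : pvFirstHit unit s (t :: r) = some (k + 1, t', r') := by
      simp [pvFirstHit, h, hq]
    rw [pvGo_some h1, pvGo_some hq]
    congr 1
    push_cast; ring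

/-- Loop invariant: A's fold from any state equals acc ++ B's window recursion,
where `bump = i0 - p` relates the next index `i0` and last boundary index `p`. -/
theorem pvFold_eq_go (unit : Int) : ∀ (l : List Int) (i0 : Int) (acc : List Int)
    (s p : Int),
    ((PySem.List.enumerate l i0).foldl
      (fun (st : List Int × Int × Int) q =>
        if q.2 - st.2.1 ≥ unit then (st.1 ++ [q.1 - st.2.2], q.2, q.1) else st)
      (acc, s, p)).1 = acc ++ pvGo unit l s (i0 - p) := by
  intro l
  induction l with
  | nil => intro i0 acc s p; simp [PySem.List.enumerate_nil, pvGo, pvFirstHit]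
  | cons t r ih =>
    intro i0 acc s p
    rw [PySem.List.enumerate_cons, List.foldl_cons]
    dsimp only
    by_cases h : t - s ≥ unit
    · rw [if_pos h]
      rw [ih (i0 + 1) (acc ++ [i0 - p]) t i0]
      have h1 : pvFirstHit unit s (t :: r) = some (0, t, r) := by
        simp [pvFirstHit, h]
      rw [pvGo_some h1]
      simp only [List.append_assoc, List.singleton_append, Nat.cast_zero, zero_add]
      congr 3
      omega
    · rw [if_neg h]
      rw [ih (i0 + 1) acc s p]
      rw [pvGo_shift unit t s (i0 - p) r h]
      congr 2
      ring

-- ===== VERDICT (by name: the statement is the Claim_ definition above) =====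
theorem CalcPerFps_py_spec : Claim_equal_CalcPerFps_py := by
  intro unit timestamps _ hpre
  unfold Spec_CalcPerFps_py
  match timestamps with
  | [] => exact absurd rfl hpre
  | t0 :: rest =>
    show CalcPerFps_py unit (t0 :: rest) = CalcPerFps_py_alt unit (t0 :: rest)
    unfold CalcPerFps_py CalcPerFps_py_alt
    simpa using pvFold_eq_go unit (t0 :: rest) 0 [] t0 0
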